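-- pv_equiv track=rewrite | github.com/Rancidwhale/CP | sheet A/CF160-D2-A.py | solve
-- ===== SOURCE A (Python) =====
-- def solve(c,n):
--     t1=c[0:-1]
--     t2=[]
--     t2.append(c[-1])
--     a=sum(t1)
--     b=c[-1]
--     while a>=b:
--         p=t1.pop()
--         a-=p
--         b+=p
--         t2.append(p)
--     return len(t2)
-- ===== SOURCE B (Python) =====
-- def solve(c, n):
--     # prefix-sum table + backward index scan (no mutation, no running pair of sums);
--     # returns len(c) - j for the largest j with 2*sum(c[:j]) < sum(c)
--     total = sum(c)
--     pre = [0]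
--     for x in c:
--         pre.append(pre[-1] + x)
--     j = len(c) - 1
--     while j >= 0:
--         if 2 * pre[j] < total:
--             return len(c) - j
--         j -= 1
-- ===== Notes on version B (the rewrite author's own statement) =====
-- stated objective: alternative
-- what changed: A destructively pops coins off a copy of the list while rebalancing two running sums and an accumulator list; B builds a prefix-sum table once and scans indices backward for the largest j with 2*pre[j] < total, returning len(c)-j with no mutation and no collected list.
import Mathlib
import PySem

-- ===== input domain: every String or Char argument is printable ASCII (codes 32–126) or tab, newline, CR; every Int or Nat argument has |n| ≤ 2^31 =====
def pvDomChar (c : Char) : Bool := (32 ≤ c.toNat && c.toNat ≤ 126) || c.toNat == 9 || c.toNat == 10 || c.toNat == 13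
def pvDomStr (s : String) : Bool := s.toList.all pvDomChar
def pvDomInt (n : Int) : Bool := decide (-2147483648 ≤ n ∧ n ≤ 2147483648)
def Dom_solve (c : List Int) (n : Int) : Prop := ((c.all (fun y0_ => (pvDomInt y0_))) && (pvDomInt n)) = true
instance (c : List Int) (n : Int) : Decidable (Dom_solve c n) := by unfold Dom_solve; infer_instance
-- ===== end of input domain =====

-- B replaces A's destructive pop-loop with two paired running sums by a prefix-sum
-- table built once plus a backward index scan (objective: alternative decomposition).


-- ===== PORT A =====
-- the while loop: pop from t1, move p from sum a to sum b, append to t2;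
-- 'none' from pop? is Python's IndexError (pop from empty list) — outside Pre_solve, junk 0
def solveGo (t1 : List Int) (a b : Int) (t2 : List Int) : Int :=
  if a ≥ b then
    match h : PySem.List.pop? t1 (-1) with
    | none => 0
    | some (p, t1') =>
        solveGo t1' (a - p) (b + p) (t2 ++ [p])
  else (t2.length : Int)
termination_by t1.length
decreasing_by
  have h2 := PySem.List.length_of_pop?_eq_some t1 h
  simp only at h2
  omega

def solve (c : List Int) (n : Int) : Int :=
  let t1 := PySem.List.slice c (some 0) (some (-1))
  match PySem.List.pyGet? c (-1) with
  | none => 0   -- IndexError on empty c, outside Pre_solve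
  | some last =>
      let t2 : List Int := [] ++ [last]
      let a := t1.sum
      let b := last
      solveGo t1 a b t2

-- ===== PORT B =====
-- the 'while j >= 0' loop; falling off the loop (Python returns None) is outside Pre_solve, junk 0
def altGo (pre : List Int) (total len : Int) (j : Int) : Int :=
  if 0 ≤ j then
    if 2 * ((PySem.List.pyGet? pre j).getD 0) < total then len - j
    else altGo pre total len (j - 1)
  else 0
termination_by (j + 1).toNat
decreasing_by omega

def solve_alt (c : List Int) (n : Int) : Int :=
  let total := c.sum
  let pre := c.foldl (fun acc x => acc ++ [(PySem.List.pyGet? acc (-1)).getD 0 + x]) [0]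
  altGo pre total (c.length : Int) ((c.length : Int) - 1)

-- ===== PRECONDITION & SPEC =====
-- Pre_solve: A raises an IndexError (c[-1] on empty c, or t1.pop() once every coin has been
-- moved while the loop condition still holds) exactly when NO index j < len(c) satisfies
-- 2*sum(c[:j]) < sum(c); Pre_solve admits exactly the inputs on which A returns.
def Pre_solve (c : List Int) (n : Int) : Prop :=
  ∃ j : Nat, j < c.length ∧ 2 * (c.take j).sum < c.sum
instance (c : List Int) (n : Int) : Decidable (Pre_solve c n) := by unfold Pre_solve; infer_instance

def pvWitness_solve : List Int × Int := ([1, 2, 3], 3)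

-- A raises IndexError where no prefix is light enough; B (returning None in Python) is not a
-- crash-fix here, so no Raises_ block.

def Spec_solve (c : List Int) (n : Int) (out : Int) : Prop := out = solve_alt c n
instance (c : List Int) (n : Int) (out : Int) : Decidable (Spec_solve c n out) := by unfold Spec_solve; infer_instance

-- ===== CLAIM (what is proved, stated in full; the proofs are below) =====
def Claim_equal_solve : Prop := ∀ (c : List Int) (n : Int), Dom_solve c n → Pre_solve c n → Spec_solve c n (solve c n)

-- ===== LEMMAS AND PROOFS =====

-- reference scan: first index j' ≤ j (going downward) with 2*sum(l[:j']) < sum(l)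
def refGo (l : List Int) : Nat → Option Int
  | 0 => if 2 * (l.take 0).sum < l.sum then some ((l.length : Int)) else none
  | j+1 => if 2 * (l.take (j+1)).sum < l.sum then some ((l.length : Int) - ((j : Int) + 1))
           else refGo l j

theorem refGo_isSome (l : List Int) (j : Nat) (h : ∃ i : Nat, i ≤ j ∧ 2 * (l.take i).sum < l.sum) :
    ∃ r, refGo l j = some r := by
  induction j with
  | zero =>
      obtain ⟨i, hi, hlt⟩ := h
      have h0 : i = 0 := by omega
      subst h0
      exact ⟨_, by simp only [refGo]; rw [if_pos hlt]⟩
  | succ j ih =>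
      by_cases hc : 2 * (l.take (j+1)).sum < l.sum
      · exact ⟨_, by simp only [refGo]; rw [if_pos hc]⟩
      · obtain ⟨i, hi, hlt⟩ := h
        have hi2 : i ≤ j := by
          by_contra hcon
          have hx : i = j + 1 := by omega
          exact hc (hx ▸ hlt)
        obtain ⟨r, hr⟩ := ih ⟨i, hi2, hlt⟩
        exact ⟨r, by simp only [refGo]; rw [if_neg hc]; exact hr⟩

theorem sum_take_drop_split (l : List Int) (j : Nat) :
    (l.take j).sum + (l.drop j).sum = l.sum := by
  rw [← List.sum_append, List.take_append_drop]

theorem take_pop (l : List Int) (j : Nat) (hj : j < l.length) :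
    PySem.List.pop? (l.take (j+1)) (-1) = some (l[j], l.take j) := by
  have h1 : l.take (j+1) = l.take j ++ [l[j]] := by
    rw [List.take_add_one]
    simp [List.getElem?_eq_getElem hj]
  rw [h1, PySem.List.pop?_last]

theorem solveGo_stop (t1 : List Int) (a b : Int) (t2 : List Int) (hab : ¬ a ≥ b) :
    solveGo t1 a b t2 = (t2.length : Int) := by
  rw [solveGo.eq_def, if_neg hab]

theorem solveGo_step (t1 : List Int) (a b : Int) (t2 : List Int) (p : Int) (t1' : List Int)
    (hab : a ≥ b) (hpop : PySem.List.pop? t1 (-1) = some (p, t1')) :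
    solveGo t1 a b t2 = solveGo t1' (a - p) (b + p) (t2 ++ [p]) := by
  rw [solveGo.eq_def, if_pos hab]
  split
  · rename_i heq; rw [heq] at hpop; cases hpop
  · rename_i p2 t12 heq
    rw [heq] at hpop
    cases hpop
    rfl

-- A's loop, from state j (t1 = l.take j), returns r - (len - j) + |t2| where refGo l j = some r
theorem solveGo_eq (l : List Int) (j : Nat) (hj : j ≤ l.length) (t2 : List Int)
    (r : Int) (hr : refGo l j = some r) :
    solveGo (l.take j) ((l.take j).sum) ((l.drop j).sum) t2
      = r - ((l.length : Int) - (j : Int)) + (t2.length : Int) := by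
  induction j generalizing t2 with
  | zero =>
      simp only [refGo] at hr
      by_cases hc : 2 * (l.take 0).sum < l.sum
      · rw [if_pos hc] at hr
        have hrv : r = (l.length : Int) := (Option.some.inj hr).symm
        subst hrv
        have hcond : ¬ ((l.take 0).sum ≥ (l.drop 0).sum) := by
          simp only [List.take_zero, List.sum_nil, List.drop_zero] at hc ⊢
          omega
        rw [solveGo_stop _ _ _ _ hcond]
        push_cast
        ring
      · rw [if_neg hc] at hr
        cases hr
  | succ j ih =>
      simp only [refGo] at hr
      have hsplit := sum_take_drop_split l (j+1)
      by_cases hc : 2 * (l.take (j+1)).sum < l.sum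
      · rw [if_pos hc] at hr
        have hrv : r = (l.length : Int) - ((j : Int) + 1) := (Option.some.inj hr).symm
        subst hrv
        have hcond : ¬ ((l.take (j+1)).sum ≥ (l.drop (j+1)).sum) := by omega
        rw [solveGo_stop _ _ _ _ hcond]
        push_cast
        ring
      · rw [if_neg hc] at hr
        have hjlt : j < l.length := by omega
        have hcond : (l.take (j+1)).sum ≥ (l.drop (j+1)).sum := by omega
        rw [solveGo_step _ _ _ _ _ _ hcond (take_pop l j hjlt)]
        have hsum : (l.take (j+1)).sum - l[j] = (l.take j).sum := by
          rw [List.sum_take_succ l j hjlt]; ring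
        have h2 := sum_take_drop_split l j
        have hdrop : (l.drop (j+1)).sum + l[j] = (l.drop j).sum := by
          rw [List.sum_take_succ l j hjlt] at hsplit; omega
        rw [hsum, hdrop, ih (by omega) _ hr]
        simp only [List.length_append, List.length_cons, List.length_nil]
        push_cast
        ring

-- B's prefix table: psums s l = running sums s+l[0], s+l[0]+l[1], …
def psums (s : Int) : List Int → List Int
  | [] => []
  | x :: xs => (s + x) :: psums (s + x) xs

theorem foldl_pre_eq (l : List Int) (acc : List Int) (s : Int)
    (h : PySem.List.pyGet? acc (-1) = some s) :
    l.foldl (fun acc x => acc ++ [(PySem.List.pyGet? acc (-1)).getD 0 + x]) acc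
      = acc ++ psums s l := by
  induction l generalizing acc s with
  | nil => simp [psums]
  | cons x xs ih =>
      simp only [List.foldl_cons, h, Option.getD_some]
      rw [ih (acc ++ [s + x]) (s + x) (PySem.List.pyGet?_neg_one_append_singleton acc (s + x))]
      simp [psums]

theorem psums_get (l : List Int) (s : Int) (j : Nat) (hj : j < l.length) :
    (psums s l)[j]? = some (s + (l.take (j+1)).sum) := by
  induction l generalizing s j with
  | nil => simp at hj
  | cons x xs ih =>
      cases j with
      | zero => simp [psums]
      | succ j =>
          simp only [psums, List.getElem?_cons_succ]
          rw [ih (s + x) j (by simpa using hj)]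
          simp only [List.take_succ_cons, List.sum_cons, Option.some.injEq]
          ring

theorem pre_get (l : List Int) (j : Nat) (hj : j ≤ l.length) :
    PySem.List.pyGet?
      (l.foldl (fun acc x => acc ++ [(PySem.List.pyGet? acc (-1)).getD 0 + x]) [0]) (j : Int)
      = some ((l.take j).sum) := by
  rw [foldl_pre_eq l [0] 0 (by decide)]
  rw [PySem.List.pyGet?_natCast]
  cases j with
  | zero => simp
  | succ j =>
      simp only [List.singleton_append, List.getElem?_cons_succ]
      rw [psums_get l 0 j (by omega)]
      simp

-- B's scan equals the reference scan
theorem altGo_eq (l : List Int) (j : Nat) (hj : j < l.length) :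
    altGo (l.foldl (fun acc x => acc ++ [(PySem.List.pyGet? acc (-1)).getD 0 + x]) [0])
      l.sum (l.length : Int) (j : Int)
      = (refGo l j).getD 0 := by
  induction j with
  | zero =>
      have hp := pre_get l 0 (by omega)
      simp only [Nat.cast_zero, List.take_zero, List.sum_nil] at hp
      rw [Nat.cast_zero, altGo.eq_def, if_pos (by omega : (0:Int) ≤ 0), hp]
      simp only [Option.getD_some, refGo, List.take_zero, List.sum_nil]
      by_cases hc : 2 * (0:Int) < l.sum
      · rw [if_pos hc, if_pos hc]
        simp
      · rw [if_neg hc, if_neg hc]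
        rw [show ((0:Int) - 1) = -1 by ring, altGo.eq_def,
            if_neg (by omega : ¬ (0:Int) ≤ -1)]
        simp
  | succ j ih =>
      have hp := pre_get l (j+1) (by omega)
      rw [altGo.eq_def, if_pos (by omega : (0:Int) ≤ ((j+1 : Nat) : Int)), hp]
      simp only [Option.getD_some, refGo]
      by_cases hc : 2 * (l.take (j+1)).sum < l.sum
      · rw [if_pos hc, if_pos hc]
        simp only [Option.getD_some]
        push_cast
        ring
      · rw [if_neg hc, if_neg hc]
        have hx : ((j+1 : Nat) : Int) - 1 = (j : Int) := by push_cast; ring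
        rw [hx]
        exact ih (by omega)

theorem slice_front (l : List Int) : PySem.List.slice l (some 0) (some (-1)) = l.dropLast := by
  rw [PySem.List.slice_zero_start, PySem.List.slice_to_neg_one]

-- ===== VERDICT (by name: the statement is the Claim_ definition above) =====
theorem solve_spec : Claim_equal_solve := by
  intro c n _ hpre
  obtain ⟨j0, hj0, hlt0⟩ := hpre
  have hlen : 0 < c.length := by omega
  have hne : c ≠ [] := by intro h; subst h; simp at hlen
  obtain ⟨r, hr⟩ := refGo_isSome c (c.length - 1) ⟨j0, by omega, hlt0⟩
  unfold Spec_solve solve solve_alt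
  rw [slice_front]
  have hget : PySem.List.pyGet? c (-1) = some (c.getLast hne) := by
    rw [PySem.List.pyGet?_neg_one, List.getLast?_eq_getLast_of_ne_nil hne]
  rw [hget]
  simp only [List.nil_append]
  have hdl : c.dropLast = c.take (c.length - 1) := List.dropLast_eq_take
  have hlast : c.getLast hne = (c.drop (c.length - 1)).sum := by
    rw [List.drop_length_sub_one hne]
    simp
  rw [hdl, hlast]
  have hcast : ((c.length : Int) - 1) = ((c.length - 1 : Nat) : Int) := by
    push_cast [Nat.cast_sub (by omega : 1 ≤ c.length)]; ring
  rw [hcast]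
  rw [solveGo_eq c (c.length - 1) (by omega) [(c.drop (c.length - 1)).sum] r hr]
  rw [altGo_eq c (c.length - 1) (by omega)]
  rw [hr]
  simp only [Option.getD_some, List.length_cons, List.length_nil]
  push_cast [Nat.cast_sub (by omega : 1 ≤ c.length)]
  ring
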